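-- pv_equiv track=rewrite | github.com/xiaoshenming/aiteacher-monorepo | apps/LandPPT/src/landppt/ai/providers.py | _choose_preferred_model
-- ===== SOURCE A (Python) =====
-- from typing import List, Dict, Any, Optional, AsyncGenerator, Union, Tuple
--
-- def _choose_preferred_model(installed: List[str]) -> str:
--     if not installed:
--         return ""
--
--     preferred_bases = [
--         "llama3.2",
--         "llama3.1",
--         "llama3",
--         "qwen2.5",
--         "qwen2",
--         "mistral",
--         "gemma2",
--         "phi3",
--         "llama2",
--     ]
--
--     normalized = [(name, name.split(":", 1)[0]) for name in installed]
--     for base in preferred_bases: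
--         for full_name, base_name in normalized:
--             if base_name == base:
--                 return full_name
--
--     return installed[0]
-- ===== SOURCE B (Python) =====
-- PREFERRED_BASES = [
--     "llama3.2",
--     "llama3.1",
--     "llama3",
--     "qwen2.5",
--     "qwen2",
--     "mistral",
--     "gemma2",
--     "phi3",
--     "llama2",
-- ]
--
-- _RANK = {b: i for i, b in enumerate(PREFERRED_BASES)}
--
--
-- def _choose_preferred_model(installed):
--     if not installed:
--         return ""
--     fallback = len(PREFERRED_BASES)
--     best = installed[0]
--     best_r = _RANK.get(installed[0].split(":", 1)[0], fallback)
--     for name in installed[1:]: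
--         r = _RANK.get(name.split(":", 1)[0], fallback)
--         if r < best_r:
--             best, best_r = name, r
--     return best
-- ===== Notes on version B (the rewrite author's own statement) =====
-- stated objective: faster
-- what changed: Replaces A's nested loops (scan the whole installed list once per preferred base) by a precomputed base-to-rank dict and a single pass over installed that tracks the minimum-rank model with a strict-less update (first installed model wins ties).
import Mathlib
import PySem

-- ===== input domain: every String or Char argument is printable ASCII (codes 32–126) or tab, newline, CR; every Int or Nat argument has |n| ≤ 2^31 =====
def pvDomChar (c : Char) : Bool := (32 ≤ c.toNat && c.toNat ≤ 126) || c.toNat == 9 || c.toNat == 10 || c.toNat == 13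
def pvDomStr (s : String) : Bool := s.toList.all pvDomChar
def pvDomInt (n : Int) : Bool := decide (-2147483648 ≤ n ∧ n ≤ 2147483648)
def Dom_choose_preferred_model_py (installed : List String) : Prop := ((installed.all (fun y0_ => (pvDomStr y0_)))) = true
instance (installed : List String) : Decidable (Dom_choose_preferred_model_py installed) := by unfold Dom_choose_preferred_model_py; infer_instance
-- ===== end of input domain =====

-- B replaces A's nested scan (each preferred base against the whole installed list) by a precomputed
-- base→rank dict and ONE pass over `installed` tracking the minimum-rank model.

-- shared helper: the Python expression `name.split(":", 1)[0]`, used verbatim by both sources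
def pvBase (s : String) : String := ((PySem.Str.splitMax? s ":" 1).getD [s]).headD s

-- the literal `preferred_bases` list, identical in both sources
def pvPreferredBases : List String :=
  ["llama3.2", "llama3.1", "llama3", "qwen2.5", "qwen2", "mistral", "gemma2", "phi3", "llama2"]

-- ===== PORT A =====
-- A's double loop: `for base in preferred_bases: for full_name, base_name in normalized: if base_name == base: return full_name`
def pvSearchA (normalized : List (String × String)) : List String → Option String
  | [] => none
  | base :: rest =>
    match normalized.find? (fun p => p.2 == base) with
    | some p => some p.1
    | none => pvSearchA normalized rest

def choose_preferred_model_py (installed : List String) : String :=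
  match installed with
  | [] => ""                                   -- if not installed: return ""
  | x0 :: _ =>
    let normalized := installed.map (fun name => (name, pvBase name))
    match pvSearchA normalized pvPreferredBases with
    | some full_name => full_name
    | none => x0                               -- return installed[0]

-- ===== PORT B =====
-- rank = {b: i for i, b in enumerate(PREFERRED_BASES)}
def pvRankDict : PySem.Dict String Int :=
  (PySem.List.enumerate pvPreferredBases).foldl (fun d p => d.insert p.2 p.1) PySem.Dict.empty

def choose_preferred_model_py_alt (installed : List String) : String :=
  match installed with
  | [] => ""
  | x0 :: rest =>
    (rest.foldl
      (fun acc name =>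
        if pvRankDict.getD (pvBase name) ((pvPreferredBases.length : Int)) < acc.2
        then (name, pvRankDict.getD (pvBase name) ((pvPreferredBases.length : Int)))
        else acc)
      (x0, pvRankDict.getD (pvBase x0) ((pvPreferredBases.length : Int)))).1

-- ===== PRECONDITION & SPEC =====
def Spec_choose_preferred_model_py (installed : List String) (out : String) : Prop := out = choose_preferred_model_py_alt installed
instance (installed : List String) (out : String) : Decidable (Spec_choose_preferred_model_py installed out) := by unfold Spec_choose_preferred_model_py; infer_instance

-- ===== CLAIM (what is proved, stated in full; the proofs are below) =====
def Claim_equal_choose_preferred_model_py : Prop := ∀ (installed : List String), Dom_choose_preferred_model_py installed → Spec_choose_preferred_model_py installed (choose_preferred_model_py installed)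

-- ===== LEMMAS AND PROOFS =====

-- index of b in Q, or Q.length when absent (the rank both programs implicitly order by)
def pvIdx : List String → String → Int
  | [], _ => 0
  | q :: Q, b => if b = q then 0 else pvIdx Q b + 1

theorem pvIdx_nonneg (Q : List String) (b : String) : 0 ≤ pvIdx Q b := by
  induction Q with
  | nil => simp [pvIdx]
  | cons q Q ih => simp only [pvIdx]; split <;> omega

theorem pvIdx_le_len (Q : List String) (b : String) : pvIdx Q b ≤ (Q.length : Int) := by
  induction Q with
  | nil => simp [pvIdx]
  | cons q Q ih => simp only [pvIdx, List.length_cons]; split <;> push_cast <;> omega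

theorem pv_foldr_min_le_init (l : List Int) (a : Int) : l.foldr min a ≤ a := by
  induction l with
  | nil => simp
  | cons x l ih => simp only [List.foldr_cons]; omega

theorem pv_foldr_min_mem (l : List Int) (a : Int) : l.foldr min a = a ∨ l.foldr min a ∈ l := by
  induction l with
  | nil => left; rfl
  | cons x l ih =>
    simp only [List.foldr_cons]
    by_cases h : x ≤ l.foldr min a
    · right; simp [min_eq_left h]
    · rcases ih with h2 | h2
      · left; omega
      · right; right; rw [min_eq_right (by omega)]; exact h2

theorem pv_foldr_min_le_mem (l : List Int) (a : Int) {x : Int} (hx : x ∈ l) : l.foldr min a ≤ x := by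
  induction l with
  | nil => simp at hx
  | cons y l ih =>
    rcases List.mem_cons.mp hx with h | h
    · subst h; simp only [List.foldr_cons]; omega
    · have := ih h; simp only [List.foldr_cons]; omega

theorem pv_foldr_min_min (l : List Int) (a b : Int) :
    l.foldr min (min a b) = min a (l.foldr min b) := by
  induction l with
  | nil => rfl
  | cons x l ih => simp only [List.foldr_cons, ih]; omega

theorem pv_find?_congr_mem {α : Type} (l : List α) (p q : α → Bool)
    (h : ∀ x ∈ l, p x = q x) : l.find? p = l.find? q := by
  induction l with
  | nil => rfl
  | cons x l ih =>
    have hx := h x (List.mem_cons_self)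
    by_cases hp : p x = true
    · rw [List.find?_cons_of_pos hp, List.find?_cons_of_pos (hx ▸ hp)]
    · rw [List.find?_cons_of_neg (by simpa using hp),
        List.find?_cons_of_neg (by simp [← hx]; simpa using hp)]
      exact ih (fun y hy => h y (List.mem_cons_of_mem _ hy))

-- A's double loop returns the first element of xs whose pvIdx-rank equals the minimum rank, when a match exists
theorem pvSearchA_char (Q : List String) (xs : List String) :
    pvSearchA (xs.map (fun n => (n, pvBase n))) Q =
      (if (xs.map (fun x => pvIdx Q (pvBase x))).foldr min (Q.length : Int) < (Q.length : Int)
       then xs.find? (fun x => pvIdx Q (pvBase x) == (xs.map (fun x => pvIdx Q (pvBase x))).foldr min (Q.length : Int))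
       else none) := by
  induction Q with
  | nil =>
    rw [if_neg]
    · rfl
    · intro hlt
      have h0 : ((([] : List String)).length : Int) = 0 := rfl
      rcases pv_foldr_min_mem (xs.map (fun x => pvIdx ([] : List String) (pvBase x)))
          ((([] : List String)).length : Int) with h | h
      · omega
      · rcases List.mem_map.mp h with ⟨y, _, hy⟩
        have hnn := pvIdx_nonneg ([] : List String) (pvBase y)
        omega
  | cons q Q ih =>
    simp only [pvSearchA]
    rw [List.find?_map]
    simp only [Function.comp_def]
    by_cases hq : ∃ x ∈ xs, pvBase x = q
    · -- some element matches q: the minimum rank is 0 and the first matcher is returned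
      obtain ⟨x', hx'mem, hx'⟩ := hq
      have hzero : (0 : Int) ∈ xs.map (fun x => pvIdx (q :: Q) (pvBase x)) := by
        refine List.mem_map.mpr ⟨x', hx'mem, ?_⟩
        simp [pvIdx, hx']
      have hlenpos : (0:Int) < (((q :: Q).length : Nat) : Int) := by
        exact_mod_cast Nat.succ_pos Q.length
      have hmin : (xs.map (fun x => pvIdx (q :: Q) (pvBase x))).foldr min ((q :: Q).length : Int) = 0 := by
        have h1 := pv_foldr_min_le_mem _ (((q :: Q).length : Nat) : Int) hzero
        rcases pv_foldr_min_mem (xs.map (fun x => pvIdx (q :: Q) (pvBase x))) (((q :: Q).length : Nat) : Int) with h | h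
        · omega
        · rcases List.mem_map.mp h with ⟨z, _, hz⟩
          have := pvIdx_nonneg (q :: Q) (pvBase z)
          omega
      rw [hmin]
      rw [if_pos hlenpos]
      have hfind : xs.find? (fun n => (n, pvBase n).2 == q) =
          xs.find? (fun x => pvIdx (q :: Q) (pvBase x) == (0 : Int)) := by
        apply pv_find?_congr_mem
        intro x _
        by_cases h : pvBase x = q
        · simp [h, pvIdx]
        · have hnn := pvIdx_nonneg Q (pvBase x)
          simp only [pvIdx, if_neg h]
          have h2 : ¬ (pvIdx Q (pvBase x) + 1 = 0) := by omega
          simp [h, h2]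
      rw [hfind]
      rcases hfound : xs.find? (fun x => pvIdx (q :: Q) (pvBase x) == (0 : Int)) with _ | v
      · exfalso
        rcases List.mem_map.mp hzero with ⟨z, hzmem, hz⟩
        have := List.find?_eq_none.mp hfound z hzmem
        simp only [beq_iff_eq] at this
        exact this hz
      · rfl
    · -- no element matches q: every rank is one more than its rank in Q
      replace hq : ∀ x ∈ xs, pvBase x ≠ q := fun x hx hx' => hq ⟨x, hx, hx'⟩
      have hnone : xs.find? (fun n => (n, pvBase n).2 == q) = none := by
        apply List.find?_eq_none.mpr
        intro x hx
        simpa using hq x hx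
      rw [hnone]
      show pvSearchA (xs.map (fun n => (n, pvBase n))) Q = _
      have hmap : xs.map (fun x => pvIdx (q :: Q) (pvBase x)) =
          (xs.map (fun x => pvIdx Q (pvBase x))).map (· + 1) := by
        rw [List.map_map]
        apply List.map_congr_left
        intro x hx
        simp [pvIdx, hq x hx]
      have hsucc : ∀ (l : List Int) (a : Int), (l.map (· + 1)).foldr min (a + 1) = l.foldr min a + 1 := by
        intro l a
        induction l with
        | nil => rfl
        | cons y l ih2 => simp only [List.map_cons, List.foldr_cons, ih2]; omega
      have hlen : ((q :: Q).length : Int) = (Q.length : Int) + 1 := by push_cast [List.length_cons]; ring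
      have hM : (xs.map (fun x => pvIdx (q :: Q) (pvBase x))).foldr min ((q :: Q).length : Int) =
          (xs.map (fun x => pvIdx Q (pvBase x))).foldr min ((Q.length : Int)) + 1 := by
        rw [hmap, hlen, hsucc]
      rw [hM, hlen, ih]
      by_cases hc : (xs.map (fun x => pvIdx Q (pvBase x))).foldr min ((Q.length : Int)) < (Q.length : Int)
      · rw [if_pos hc, if_pos (by omega)]
        apply pv_find?_congr_mem
        intro x hx
        simp only [pvIdx, if_neg (hq x hx)]
        rcases eq_or_ne (pvIdx Q (pvBase x))
            ((xs.map (fun x => pvIdx Q (pvBase x))).foldr min ((Q.length : Int))) with he | he <;>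
          simp [he]
      · rw [if_neg hc, if_neg (by omega)]

-- B's single pass returns the first element attaining the running minimum rank (strictly below the seed), else the seed
theorem pvFold_char (g : String → Int) (t : List String) (b0 : String) (r0 : Int) :
    t.foldl (fun acc name => if g name < acc.2 then (name, g name) else acc) (b0, r0) =
      (if (t.map g).foldr min r0 < r0
       then ((t.find? (fun x => g x == (t.map g).foldr min r0)).getD b0, (t.map g).foldr min r0)
       else (b0, r0)) := by
  induction t generalizing b0 r0 with
  | nil => simp
  | cons x t ih =>
    simp only [List.foldl_cons, List.map_cons, List.foldr_cons]
    have hlei := pv_foldr_min_le_init (t.map g) r0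
    by_cases hx : g x < r0
    · rw [if_pos hx, ih]
      have hmx : (t.map g).foldr min (g x) = min (g x) ((t.map g).foldr min r0) := by
        rw [← pv_foldr_min_min, min_eq_left (le_of_lt hx)]
      by_cases hc : (t.map g).foldr min (g x) < g x
      · -- a strictly better element exists in t
        have hlt : min (g x) ((t.map g).foldr min r0) < g x := hmx ▸ hc
        have hmin : min (g x) ((t.map g).foldr min r0) = (t.map g).foldr min r0 := by omega
        rw [if_pos hc, if_pos (by omega), hmx, hmin]
        rw [List.find?_cons_of_neg (p := fun y => g y == (t.map g).foldr min r0) (a := x)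
          (by simp only [beq_iff_eq]; omega)]
        obtain ⟨v, hv⟩ : ∃ v, t.find? (fun y => g y == (t.map g).foldr min r0) = some v := by
          have hmem : (t.map g).foldr min r0 ∈ t.map g := by
            rcases pv_foldr_min_mem (t.map g) r0 with h | h
            · omega
            · exact h
          rcases List.mem_map.mp hmem with ⟨z, hz, hzv⟩
          have : (t.find? (fun y => g y == (t.map g).foldr min r0)).isSome = true :=
            List.find?_isSome.mpr ⟨z, hz, by simp [hzv]⟩
          exact Option.isSome_iff_exists.mp this
        rw [hv]
        rfl
      · -- x itself stays the best
        have heq : min (g x) ((t.map g).foldr min r0) = g x := by omega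
        rw [if_neg hc, if_pos (by omega)]
        rw [List.find?_cons_of_pos (p := fun y => g y == min (g x) ((t.map g).foldr min r0)) (a := x)
          (by simp only [beq_iff_eq]; omega)]
        simp [heq]
    · -- g x ≥ r0: x is ignored
      rw [if_neg hx, ih]
      have hmx : min (g x) ((t.map g).foldr min r0) = (t.map g).foldr min r0 := by omega
      rw [hmx]
      by_cases hc : (t.map g).foldr min r0 < r0
      · rw [if_pos hc, if_pos hc]
        rw [List.find?_cons_of_neg (p := fun y => g y == (t.map g).foldr min r0) (a := x)
          (by simp only [beq_iff_eq]; omega)]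
      · rw [if_neg hc, if_neg hc]

-- the dict lookup in B computes the rank pvIdx in the preference list
theorem pvRankDict_getD (b : String) :
    pvRankDict.getD b ((pvPreferredBases.length : Int)) = pvIdx pvPreferredBases b := by
  have hd : pvRankDict = PySem.Dict.mk
      [("llama3.2", 0), ("llama3.1", 1), ("llama3", 2), ("qwen2.5", 3), ("qwen2", 4),
       ("mistral", 5), ("gemma2", 6), ("phi3", 7), ("llama2", 8)] := by decide
  rw [hd]
  by_cases h1 : b = "llama3.2"
  · subst h1; decide
  by_cases h2 : b = "llama3.1"
  · subst h2; decide
  by_cases h3 : b = "llama3"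
  · subst h3; decide
  by_cases h4 : b = "qwen2.5"
  · subst h4; decide
  by_cases h5 : b = "qwen2"
  · subst h5; decide
  by_cases h6 : b = "mistral"
  · subst h6; decide
  by_cases h7 : b = "gemma2"
  · subst h7; decide
  by_cases h8 : b = "phi3"
  · subst h8; decide
  by_cases h9 : b = "llama2"
  · subst h9; decide
  have c : ∀ (s : String), b ≠ s → (s == b) = false :=
    fun s hs => beq_eq_false_iff_ne.mpr (fun e => hs e.symm)
  simp only [PySem.Dict.getD, PySem.Dict.get?_mk_cons, pvPreferredBases, pvIdx,
    c _ h1, c _ h2, c _ h3, c _ h4, c _ h5, c _ h6, c _ h7, c _ h8, c _ h9,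
    if_neg h1, if_neg h2, if_neg h3, if_neg h4, if_neg h5, if_neg h6, if_neg h7, if_neg h8, if_neg h9,
    Bool.false_eq_true, if_false]
  simp [PySem.Dict.get?]

-- ===== VERDICT (by name: the statement is the Claim_ definition above) =====
theorem choose_preferred_model_py_spec : Claim_equal_choose_preferred_model_py := by
  intro installed _
  unfold Spec_choose_preferred_model_py choose_preferred_model_py choose_preferred_model_py_alt
  match installed with
  | [] => rfl
  | x0 :: t =>
    simp only
    set rk : String → Int := fun s => pvIdx pvPreferredBases (pvBase s) with hrk
    have hg : ∀ s, pvRankDict.getD (pvBase s) ((pvPreferredBases.length : Int)) = rk s :=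
      fun s => pvRankDict_getD (pvBase s)
    have hfold :
        (t.foldl
          (fun acc name =>
            if pvRankDict.getD (pvBase name) ((pvPreferredBases.length : Int)) < acc.2
            then (name, pvRankDict.getD (pvBase name) ((pvPreferredBases.length : Int))) else acc)
          (x0, pvRankDict.getD (pvBase x0) ((pvPreferredBases.length : Int)))) =
        (t.foldl (fun acc name => if rk name < acc.2 then (name, rk name) else acc) (x0, rk x0)) := by
      rw [hg x0]
      apply PySem.List.foldl_congr_mem
      intro acc name _
      rw [hg name]
    rw [hfold, pvFold_char, pvSearchA_char]
    set L : Int := ((pvPreferredBases.length : Nat) : Int) with hL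
    set mAll : Int := (((x0 :: t).map (fun x => pvIdx pvPreferredBases (pvBase x))).foldr min L) with hmAll
    set mT : Int := ((t.map rk).foldr min (rk x0)) with hmT
    have hx0L : rk x0 ≤ L := pvIdx_le_len _ _
    have hmap : (x0 :: t).map (fun x => pvIdx pvPreferredBases (pvBase x)) = rk x0 :: t.map rk := by
      simp [hrk]
    have hMT : mT = min (rk x0) ((t.map rk).foldr min L) := by
      rw [hmT, ← pv_foldr_min_min, min_eq_left hx0L]
    have hAllT : mAll = min (rk x0) ((t.map rk).foldr min L) := by
      rw [hmAll, hmap]; simp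
    have hMeq : mT = mAll := by rw [hMT, hAllT]
    by_cases hc : mAll < L
    · rw [if_pos hc]
      by_cases hx0 : rk x0 = mAll
      · -- the head already attains the minimum: both return x0
        have hnc : ¬ mT < rk x0 := by omega
        rw [List.find?_cons_of_pos (p := fun x => pvIdx pvPreferredBases (pvBase x) == mAll) (a := x0)
          (by simp only [beq_iff_eq]; exact hx0), if_neg hnc]
      · -- the minimum is attained strictly inside t
        have hle : mAll ≤ rk x0 := by rw [hAllT]; omega
        have hlt : mAll < rk x0 := by omega
        rw [List.find?_cons_of_neg (p := fun x => pvIdx pvPreferredBases (pvBase x) == mAll) (a := x0)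
          (by simp only [beq_iff_eq]; exact hx0), if_pos (by omega)]
        have hpred : t.find? (fun x => pvIdx pvPreferredBases (pvBase x) == mAll) =
            t.find? (fun x => rk x == mT) := by
          apply pv_find?_congr_mem
          intro x _
          rw [hMeq]
        rw [hpred]
        rcases t.find? (fun x => rk x == mT) with _ | v <;> rfl
    · rw [if_neg hc]
      have hleL : mAll ≤ L := by rw [hmAll]; exact pv_foldr_min_le_init _ _
      have hle : mAll ≤ rk x0 := by rw [hAllT]; omega
      have hnc : ¬ mT < rk x0 := by omega
      rw [if_neg hnc]
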